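-- pv_equiv track=rewrite | github.com/anniebryan/advent-of-code-19 | 2021/day4/solution.py | get_input_boards
-- ===== SOURCE A (Python) =====
-- def get_input_boards(puzzle_input):
--     boards = []
--     current_board = []
--     for row in puzzle_input[2:]:
--         if row == "":
--             boards.append(current_board)
--             current_board = []
--         else:
--             current_board.append([int(item) for item in row.split() if len(item) > 0])
--     boards.append(current_board)
--
--     boards_dict = {}
--     for i, board in enumerate(boards):
--         board_dict = {}
--         for j, row in enumerate(board):
--             for k, val in enumerate(row):
--                 board_dict[val] = (j, k)
--         boards_dict[i] = board_dict
--     return boards_dict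
-- ===== SOURCE B (Python) =====
-- def get_input_boards(puzzle_input):
--     # One fused pass: build boards_dict directly while scanning the rows,
--     # never materializing the intermediate list of boards.
--     boards_dict = {}
--     i = 0
--     j = 0
--     board_dict = {}
--     for row in puzzle_input[2:]:
--         if row == "":
--             boards_dict[i] = board_dict
--             i += 1
--             j = 0
--             board_dict = {}
--         else:
--             for k, val in enumerate(int(x) for x in row.split()):
--                 board_dict[val] = (j, k)
--             j += 1
--     boards_dict[i] = board_dict
--     return boards_dict
-- ===== Notes on version B (the rewrite author's own statement) =====
-- stated objective: alternative
-- what changed: B fuses A's two phases (collect a list of boards, then enumerate it to build dicts) into a single pass over the rows that maintains a board counter, a row counter and the current board's dict directly, never materializing the intermediate list of boards.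
import Mathlib
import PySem

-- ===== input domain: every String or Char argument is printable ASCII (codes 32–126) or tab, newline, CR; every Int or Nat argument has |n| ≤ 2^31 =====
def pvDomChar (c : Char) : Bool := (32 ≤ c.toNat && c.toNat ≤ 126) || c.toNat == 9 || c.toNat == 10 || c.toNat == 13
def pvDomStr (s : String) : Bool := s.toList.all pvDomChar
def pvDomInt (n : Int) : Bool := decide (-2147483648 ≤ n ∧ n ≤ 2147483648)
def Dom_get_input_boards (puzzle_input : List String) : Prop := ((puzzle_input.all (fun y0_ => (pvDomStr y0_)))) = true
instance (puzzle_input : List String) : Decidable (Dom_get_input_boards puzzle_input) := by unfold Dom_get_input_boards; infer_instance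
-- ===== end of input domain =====

-- B fuses the two phases of A into one pass over the rows (no intermediate list of boards);
-- objective: simpler/alternative decomposition, same asymptotic cost.

-- int(item); Pre_ excludes inputs where int() would raise ValueError
def pvInt (s : String) : Int := (PySem.Int.ofStr? s).getD 0

-- `for k, val in enumerate(row): board_dict[val] = (j, k)` (shared by both Pythons verbatim)
def pvRowDict (bd : PySem.Dict Int (Int × Int)) (j : Int) (r : List Int) : PySem.Dict Int (Int × Int) :=
  (PySem.List.enumerate r 0).foldl (fun bd kv => bd.insert kv.2 (j, kv.1)) bd

-- ===== PORT A =====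
-- `[int(item) for item in row.split() if len(item) > 0]`
def pvParseRowA (row : String) : List Int :=
  ((PySem.Str.split₀ row).filter (fun it => PySem.Str.len it > 0)).map pvInt

def get_input_boards (puzzle_input : List String) : List (Int × List (Int × Int × Int)) :=
  let st := (PySem.List.slice puzzle_input (some 2) none).foldl
    (fun (st : List (List (List Int)) × List (List Int)) row =>
      if row == "" then (st.1 ++ [st.2], []) else (st.1, st.2 ++ [pvParseRowA row]))
    ([], [])
  let boards := st.1 ++ [st.2]
  let boardsDict := (PySem.List.enumerate boards 0).foldl
    (fun D ib =>
      D.insert ib.1 ((PySem.List.enumerate ib.2 0).foldl (fun bd jr => pvRowDict bd jr.1 jr.2) PySem.Dict.empty))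
    PySem.Dict.empty
  boardsDict.items.map (fun p => (p.1, p.2.items))

-- ===== PORT B =====
def get_input_boards_alt (puzzle_input : List String) : List (Int × List (Int × Int × Int)) :=
  let st := (PySem.List.slice puzzle_input (some 2) none).foldl
    (fun (st : PySem.Dict Int (PySem.Dict Int (Int × Int)) × Int × Int × PySem.Dict Int (Int × Int)) row =>
      if row == "" then (st.1.insert st.2.1 st.2.2.2, st.2.1 + 1, 0, PySem.Dict.empty)
      else (st.1, st.2.1, st.2.2.1 + 1, pvRowDict st.2.2.2 st.2.2.1 ((PySem.Str.split₀ row).map pvInt)))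
    (PySem.Dict.empty, 0, 0, PySem.Dict.empty)
  ((st.1.insert st.2.1 st.2.2.2).items).map (fun p => (p.1, p.2.items))

-- ===== PRECONDITION & SPEC =====
-- Pre_ excludes exactly the inputs where Python's int() raises ValueError on some whitespace-split
-- token of a non-empty row after the first two lines.
def Pre_get_input_boards (puzzle_input : List String) : Prop :=
  ((puzzle_input.drop 2).all
    (fun row => (PySem.Str.split₀ row).all (fun t => (PySem.Int.ofStr? t).isSome))) = true
instance (puzzle_input : List String) : Decidable (Pre_get_input_boards puzzle_input) := by
  unfold Pre_get_input_boards; infer_instance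

def pvWitness_get_input_boards : List String :=
  ["7,4,9", "", "1 2", "3 4", "", "+5 0_1", "  17 "]

def Spec_get_input_boards (puzzle_input : List String) (out : List (Int × List (Int × Int × Int))) : Prop := out = get_input_boards_alt puzzle_input
instance (puzzle_input : List String) (out : List (Int × List (Int × Int × Int))) : Decidable (Spec_get_input_boards puzzle_input out) := by unfold Spec_get_input_boards; infer_instance

-- ===== CLAIM (what is proved, stated in full; the proofs are below) =====
def Claim_equal_get_input_boards : Prop := ∀ (puzzle_input : List String), Dom_get_input_boards puzzle_input → Pre_get_input_boards puzzle_input → Spec_get_input_boards puzzle_input (get_input_boards puzzle_input)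

-- ===== LEMMAS AND PROOFS =====

-- the list of boards A's first loop produces, given the current partial board
def pvBoards : List String → List (List Int) → List (List (List Int))
  | [], cur => [cur]
  | row :: rest, cur =>
    if row == "" then cur :: pvBoards rest [] else pvBoards rest (cur ++ [pvParseRowA row])

def pvDictOfBoard (b : List (List Int)) : PySem.Dict Int (Int × Int) :=
  (PySem.List.enumerate b 0).foldl (fun bd jr => pvRowDict bd jr.1 jr.2) PySem.Dict.empty

def pvG (D : PySem.Dict Int (PySem.Dict Int (Int × Int))) (i : Int) :
    List (List (List Int)) → PySem.Dict Int (PySem.Dict Int (Int × Int))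
  | [] => D
  | b :: bs => pvG (D.insert i (pvDictOfBoard b)) (i + 1) bs

-- split() yields only nonempty tokens
theorem split₀_go_ne_nil (s : List Char) (cur : List Char) (acc : List (List Char))
    (hacc : ∀ t ∈ acc, t ≠ []) :
    ∀ t ∈ PySem.Chars.split₀.go s cur acc, t ≠ [] := by
  induction s generalizing cur acc with
  | nil =>
    intro t ht
    unfold PySem.Chars.split₀.go at ht
    split at ht
    · exact hacc t (List.mem_reverse.mp ht)
    · rename_i h'
      rcases List.mem_cons.mp (List.mem_reverse.mp ht) with h | h
      · simp only [List.isEmpty_iff] at h'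
        simp [h, h']
      · exact hacc t h
  | cons c rest ih =>
    intro t ht
    unfold PySem.Chars.split₀.go at ht
    split at ht
    · split at ht
      · exact ih [] acc hacc t ht
      · rename_i h'
        refine ih [] (cur.reverse :: acc) ?_ t ht
        intro u hu
        simp only [List.isEmpty_iff] at h'
        rcases List.mem_cons.mp hu with h2 | hu
        · simp [h2, h']
        · exact hacc _ hu
    · exact ih (c :: cur) acc hacc t ht

theorem parseRowA_eq (row : String) :
    pvParseRowA row = (PySem.Str.split₀ row).map pvInt := by
  unfold pvParseRowA
  congr 1
  apply List.filter_eq_self.mpr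
  intro t ht
  have h1 : t.toList ∈ PySem.Chars.split₀ row.toList := by
    rw [← PySem.Str.split₀_map_toList]
    exact List.mem_map_of_mem ht
  have h2 : t.toList ≠ [] := by
    unfold PySem.Chars.split₀ at h1
    exact split₀_go_ne_nil _ _ _ (by simp) _ h1
  have : 0 < t.toList.length := List.length_pos_iff.mpr h2
  simp [PySem.Str.len]
  simpa using this

theorem phase1_eq (rows : List String) :
    ∀ (acc : List (List (List Int))) (cur : List (List Int)),
    (rows.foldl
      (fun (st : List (List (List Int)) × List (List Int)) row =>
        if row == "" then (st.1 ++ [st.2], []) else (st.1, st.2 ++ [pvParseRowA row]))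
      (acc, cur)).1
    ++ [(rows.foldl
      (fun (st : List (List (List Int)) × List (List Int)) row =>
        if row == "" then (st.1 ++ [st.2], []) else (st.1, st.2 ++ [pvParseRowA row]))
      (acc, cur)).2]
    = acc ++ pvBoards rows cur := by
  induction rows with
  | nil => intro acc cur; simp [pvBoards]
  | cons row rest ih =>
    intro acc cur
    rw [List.foldl_cons]
    by_cases h : row = ""
    · rw [if_pos (beq_iff_eq.mpr h), ih]
      simp [pvBoards, h]
    · rw [if_neg (by simp [h]), ih]
      simp [pvBoards, h]

theorem phase2_eq (bs : List (List (List Int))) :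
    ∀ (D : PySem.Dict Int (PySem.Dict Int (Int × Int))) (i : Int),
    (PySem.List.enumerate bs i).foldl
      (fun D ib =>
        D.insert ib.1 ((PySem.List.enumerate ib.2 0).foldl (fun bd jr => pvRowDict bd jr.1 jr.2) PySem.Dict.empty))
      D
    = pvG D i bs := by
  induction bs with
  | nil => intro D i; simp [PySem.List.enumerate_nil, pvG]
  | cons b rest ih =>
    intro D i
    rw [PySem.List.enumerate_cons]
    simp only [List.foldl_cons]
    rw [ih]
    rfl

theorem dictOfBoard_append (cur : List (List Int)) (r : List Int) :
    pvDictOfBoard (cur ++ [r]) = pvRowDict (pvDictOfBoard cur) (cur.length : Int) r := by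
  unfold pvDictOfBoard
  rw [PySem.List.enumerate_append, List.foldl_append]
  simp

theorem fused_eq (rows : List String) :
    ∀ (D : PySem.Dict Int (PySem.Dict Int (Int × Int))) (i : Int) (cur : List (List Int)),
    (let s := rows.foldl
      (fun (st : PySem.Dict Int (PySem.Dict Int (Int × Int)) × Int × Int × PySem.Dict Int (Int × Int)) row =>
        if row == "" then (st.1.insert st.2.1 st.2.2.2, st.2.1 + 1, 0, PySem.Dict.empty)
        else (st.1, st.2.1, st.2.2.1 + 1, pvRowDict st.2.2.2 st.2.2.1 ((PySem.Str.split₀ row).map pvInt)))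
      (D, i, (cur.length : Int), pvDictOfBoard cur)
     s.1.insert s.2.1 s.2.2.2)
    = pvG D i (pvBoards rows cur) := by
  induction rows with
  | nil => intro D i cur; simp [pvBoards, pvG]
  | cons row rest ih =>
    intro D i cur
    simp only [List.foldl_cons]
    by_cases h : row = ""
    · rw [if_pos (beq_iff_eq.mpr h)]
      have := ih (D.insert i (pvDictOfBoard cur)) (i + 1) []
      simpa [pvBoards, pvG, h, show pvDictOfBoard [] = PySem.Dict.empty from rfl] using this
    · rw [if_neg (by simp [h]), ← parseRowA_eq]
      have h2 : pvBoards (row :: rest) cur = pvBoards rest (cur ++ [pvParseRowA row]) := by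
        simp [pvBoards, h]
      rw [h2]
      have := ih D i (cur ++ [pvParseRowA row])
      rw [dictOfBoard_append] at this
      push_cast at this
      simpa using this

-- ===== VERDICT (by name: the statement is the Claim_ definition above) =====
theorem get_input_boards_spec : Claim_equal_get_input_boards := by
  intro puzzle_input _ _
  unfold Spec_get_input_boards get_input_boards get_input_boards_alt
  simp only []
  rw [phase1_eq, phase2_eq]
  have := fused_eq (PySem.List.slice puzzle_input (some 2) none) PySem.Dict.empty 0 []
  simp only [pvDictOfBoard, PySem.List.enumerate_nil, List.foldl_nil, List.length_nil,
    Nat.cast_zero, List.nil_append] at this ⊢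
  rw [this]
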